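-- pv_equiv track=rewrite | github.com/wudale111/leecode | src/回溯/combinesum4.py | combinesum
-- ===== SOURCE A (Python) =====
-- def combinesum(nums,k):
--     path=[]
--     res=[]
--     def backtrack(nums,k,startindex):
--         if len(path)==k:
--             return res.append(path[:])
--         for i in range(startindex,len(nums)):
--             #if i > 0 and nums[i] == nums[i - 1]:
--             #[[1, 2], [1, 3], [2, 3]]
--             #[[1, 1], [1, 2], [1, 3], [2, 3]]
--             if i>startindex and nums[i] == nums[i-1]:
--                 continue
--             path.append(nums[i])
--             backtrack(nums,k,i+1)
--             path.pop()
--     backtrack(nums,k,0)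
--     return res
-- ===== SOURCE B (Python) =====
-- def combinesum(nums, k):
--     # Generate-then-filter: enumerate all k-combinations of indices in
--     # lexicographic order, then keep those passing the duplicate-skip rule.
--     n = len(nums)
--     if k < 0:
--         return []
--
--     def combs(start, m):
--         if m == 0:
--             return [[]]
--         return [[i] + rest for i in range(start, n) for rest in combs(i + 1, m - 1)]
--
--     def ok(t):
--         s = 0
--         for i in t:
--             if i > s and nums[i] == nums[i - 1]:
--                 return False
--             s = i + 1
--         return True
--
--     return [[nums[i] for i in t] for t in combs(0, k) if ok(t)]
-- ===== Notes on version B (the rewrite author's own statement) =====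
-- stated objective: alternative
-- what changed: A prunes duplicates during a mutating backtracking recursion (path/res accumulators); B enumerates all k-index-combinations in lexicographic order with a pure recursive generator and then filters them with a standalone duplicate-skip predicate before mapping indices to values.
import Mathlib
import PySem

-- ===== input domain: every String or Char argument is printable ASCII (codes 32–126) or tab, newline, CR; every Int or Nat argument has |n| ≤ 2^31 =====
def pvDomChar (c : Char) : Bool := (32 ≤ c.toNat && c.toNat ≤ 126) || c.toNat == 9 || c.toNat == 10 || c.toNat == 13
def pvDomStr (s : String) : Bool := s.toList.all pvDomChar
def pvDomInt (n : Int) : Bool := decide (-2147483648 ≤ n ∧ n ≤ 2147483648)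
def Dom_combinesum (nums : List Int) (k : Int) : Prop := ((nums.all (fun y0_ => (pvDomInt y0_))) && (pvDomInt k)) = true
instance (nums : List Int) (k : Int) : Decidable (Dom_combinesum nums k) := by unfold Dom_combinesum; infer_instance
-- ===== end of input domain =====

-- B replaces A's mutating duplicate-pruning backtracking by a pure
-- generate-all-combinations-then-filter pipeline (objective: alternative).

-- ===== PORT A =====
-- A's nested backtrack, with the mutable path/res threaded as accumulators.
-- fuel bounds the recursion depth (each recursive call strictly increases
-- startindex, so fuel = nums.length at the top call is always enough);
-- nums[i] / nums[i-1] are accessed only under the guard i < nums.length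
-- (and i ≥ 1 for i-1, since i > startindex ≥ 0), so getD is exact there.
mutual
def pvBt (nums : List Int) (k : Int) (fuel : Nat) (start : Nat) (path : List Int) (res : List (List Int)) : List (List Int) :=
  if (path.length : Int) = k then res ++ [path]
  else match fuel with
    | 0 => res
    | fuel' + 1 => pvLoop nums k fuel' start start path res
termination_by (fuel, 0, 0)

def pvLoop (nums : List Int) (k : Int) (fuel : Nat) (i : Nat) (start : Nat) (path : List Int) (res : List (List Int)) : List (List Int) :=
  if _h : i < nums.length then
    pvLoop nums k fuel (i+1) start path
      (if i > start ∧ nums.getD i 0 = nums.getD (i-1) 0 then res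
       else pvBt nums k fuel (i+1) (path ++ [nums.getD i 0]) res)
  else res
termination_by (fuel, 1, nums.length + 1 - i)
end

def combinesum (nums : List Int) (k : Int) : List (List Int) :=
  pvBt nums k nums.length 0 [] []

-- ===== PORT B =====
-- combs start m: all strictly increasing index lists of length m drawn from
-- [start, nums.length), in lexicographic order (B's recursive generator).
def pvCombs (n : Nat) : Nat → Nat → List (List Nat)
  | _, 0 => [[]]
  | start, m + 1 =>
      (List.range' start (n - start)).flatMap
        (fun i => (pvCombs n (i+1) m).map (fun rest => i :: rest))

-- B's ok predicate: the running `s` accumulator becomes the first argument.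
def pvOk (nums : List Int) : Nat → List Nat → Bool
  | _, [] => true
  | s, i :: rest =>
      if i > s ∧ nums.getD i 0 = nums.getD (i-1) 0 then false
      else pvOk nums (i+1) rest

def combinesum_alt (nums : List Int) (k : Int) : List (List Int) :=
  if k < 0 then []
  else ((pvCombs nums.length 0 k.toNat).filter (pvOk nums 0)).map
        (fun t => t.map (fun i => nums.getD i 0))

-- ===== PRECONDITION & SPEC =====
def Spec_combinesum (nums : List Int) (k : Int) (out : List (List Int)) : Prop := out = combinesum_alt nums k
instance (nums : List Int) (k : Int) (out : List (List Int)) : Decidable (Spec_combinesum nums k out) := by unfold Spec_combinesum; infer_instance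

-- ===== CLAIM (what is proved, stated in full; the proofs are below) =====
def Claim_equal_combinesum : Prop := ∀ (nums : List Int) (k : Int), Dom_combinesum nums k → Spec_combinesum nums k (combinesum nums k)

-- ===== LEMMAS AND PROOFS =====

-- pruned generator: what A's search enumerates, index-wise
def pvPg (nums : List Int) : Nat → Nat → List (List Nat)
  | _, 0 => [[]]
  | start, m + 1 =>
      (List.range' start (nums.length - start)).flatMap
        (fun i => if i > start ∧ nums.getD i 0 = nums.getD (i-1) 0 then []
                  else (pvPg nums (i+1) m).map (fun rest => i :: rest))

theorem pvFilter_cons_map (nums : List Int) (i s : Nat) (L : List (List Nat)) :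
    (L.map (fun rest => i :: rest)).filter (pvOk nums s)
      = if i > s ∧ nums.getD i 0 = nums.getD (i-1) 0 then []
        else (L.filter (pvOk nums (i+1))).map (fun rest => i :: rest) := by
  induction L with
  | nil => simp
  | cons t L ih =>
      simp only [List.map_cons, List.filter_cons, pvOk]
      split_ifs with h <;> simp_all

theorem pvPg_eq_filter (nums : List Int) (m : Nat) : ∀ start,
    pvPg nums start m = (pvCombs nums.length start m).filter (pvOk nums start) := by
  induction m with
  | zero => intro start; simp [pvPg, pvCombs, pvOk]
  | succ m ih =>
      intro start
      simp only [pvPg, pvCombs, List.filter_flatMap]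
      refine List.flatMap_congr ?_
      intro i _
      rw [pvFilter_cons_map, ← ih]

-- main invariant of A's backtracking
theorem pvBt_spec (nums : List Int) (k : Int) :
    ∀ fuel start path res, nums.length - start ≤ fuel →
      pvBt nums k fuel start path res
        = res ++ (if (path.length : Int) ≤ k then
            (pvPg nums start (k - path.length).toNat).map
              (fun t => path ++ t.map (fun i => nums.getD i 0))
          else []) := by
  intro fuel
  induction fuel with
  | zero =>
      intro start path res hfuel
      rw [pvBt]
      by_cases hk : (path.length : Int) = k
      · simp [hk, pvPg]
      · have hn : nums.length ≤ start := by omega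
        by_cases hle : (path.length : Int) ≤ k
        · have hm : ∃ m, (k - (path.length : Int)).toNat = m + 1 := by
            refine ⟨(k - (path.length : Int)).toNat - 1, ?_⟩; omega
          obtain ⟨m, hm⟩ := hm
          have hr : nums.length - start = 0 := by omega
          simp [hk, hle, hm, pvPg, hr]
        · simp [hk, hle]
  | succ fuel ih =>
      intro start path res hfuel
      rw [pvBt]
      by_cases hk : (path.length : Int) = k
      · simp [hk, pvPg]
      · simp only [hk, if_false]
        by_cases hle : (path.length : Int) ≤ k
        · have hlt : (path.length : Int) < k := lt_of_le_of_ne hle hk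
          have hm : (k - (path.length : Int)).toNat
              = ((k - (path.length : Int)).toNat - 1) + 1 := by omega
          set m := (k - (path.length : Int)).toNat - 1 with hmdef
          -- loop lemma, inline by induction on the remaining range
          have hloop : ∀ d i res, start ≤ i → nums.length - i ≤ d →
              pvLoop nums k fuel i start path res
                = res ++ ((List.range' i (nums.length - i)).flatMap
                    (fun j => if j > start ∧ nums.getD j 0 = nums.getD (j-1) 0 then []
                      else (pvPg nums (j+1) m).map
                        (fun t => path ++ (j :: t).map (fun x => nums.getD x 0)))) := by
            intro d
            induction d with
            | zero =>
                intro i res hsi hd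
                rw [pvLoop]
                have : ¬ i < nums.length := by omega
                simp [this, show nums.length - i = 0 by omega]
            | succ d ihd =>
                intro i res hsi hd
                rw [pvLoop]
                by_cases hi : i < nums.length
                · simp only [hi, dif_pos]
                  have hrange : nums.length - i = (nums.length - (i+1)) + 1 := by omega
                  rw [ihd (i+1) _ (by omega) (by omega)]
                  rw [hrange, List.range'_succ, List.flatMap_cons]
                  by_cases hskip : i > start ∧ nums.getD i 0 = nums.getD (i-1) 0
                  · rw [if_pos hskip, if_pos hskip]; simp
                  · rw [if_neg hskip, if_neg hskip]
                    rw [ih (i+1) (path ++ [nums.getD i 0]) res (by omega)]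
                    have hlen : ((path ++ [nums.getD i 0]).length : Int) = path.length + 1 := by
                      simp
                    have hle' : ((path ++ [nums.getD i 0]).length : Int) ≤ k := by
                      rw [hlen]; omega
                    have hm' : (k - ((path ++ [nums.getD i 0]).length : Int)).toNat = m := by
                      rw [hlen]; omega
                    simp only [hle', if_pos, hm', List.append_assoc]
                    congr 1
                · simp [hi, show nums.length - i = 0 by omega]
          rw [hloop (nums.length - start) start res (le_refl _) (by omega)]
          simp only [hle, if_pos]
          rw [hm, pvPg]
          simp [List.map_flatMap]
          refine List.flatMap_congr ?_
          intro j _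
          split_ifs <;> simp [Function.comp]
        · -- path.length > k: the search never appends anything
          have hgt : k < (path.length : Int) := by omega
          have hloop : ∀ d i res, start ≤ i → nums.length - i ≤ d →
              pvLoop nums k fuel i start path res = res := by
            intro d
            induction d with
            | zero =>
                intro i res hsi hd
                rw [pvLoop]
                have : ¬ i < nums.length := by omega
                simp [this]
            | succ d ihd =>
                intro i res hsi hd
                rw [pvLoop]
                by_cases hi : i < nums.length
                · simp only [hi, dif_pos]
                  rw [ihd (i+1) _ (by omega) (by omega)]
                  by_cases hskip : i > start ∧ nums.getD i 0 = nums.getD (i-1) 0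
                  · rw [if_pos hskip]
                  · rw [if_neg hskip]
                    rw [ih (i+1) (path ++ [nums.getD i 0]) res (by omega)]
                    have hni : ¬ (((path ++ [nums.getD i 0]).length : Int) ≤ k) := by
                      simp; omega
                    rw [if_neg hni, List.append_nil]
                · simp [hi]
          rw [hloop (nums.length - start) start res (le_refl _) (by omega)]
          simp [hle]

-- ===== VERDICT (by name: the statement is the Claim_ definition above) =====
theorem combinesum_spec : Claim_equal_combinesum := by
  intro nums k _
  unfold Spec_combinesum combinesum combinesum_alt
  rw [pvBt_spec nums k nums.length 0 [] [] (by omega)]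
  by_cases hk : k < 0
  · have hni : ¬ (((([] : List Int)).length : Int) ≤ k) := by simp; omega
    simp [hk]
  · have h0 : ((([] : List Int)).length : Int) ≤ k := by simp; omega
    simp only [hk, if_false, h0, if_pos, List.nil_append]
    rw [show (k - ((([] : List Int)).length : Int)).toNat = k.toNat by simp]
    rw [pvPg_eq_filter]
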